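-- pv_equiv track=rewrite | github.com/leidZhang/QCar-Remote-Control | client/dependencies/q_libs/lib_utilities.py | extractPointGivenRow
-- ===== SOURCE A (Python) =====
-- def extractPointGivenRow(row):
-- 	counter = len(row)
-- 	solution = -1
-- 	for i in range(len(row)):
-- 		if row[counter - 1 - i] > 0:
-- 			solution = counter - 1 - i
-- 			break
--
-- 	return solution
-- ===== SOURCE B (Python) =====
-- def extractPointGivenRow(row):
-- 	return max((i for i, v in enumerate(row) if v > 0), default=-1)
-- ===== Notes on version B (the rewrite author's own statement) =====
-- stated objective: simpler
-- what changed: Replaced the backwards index-arithmetic scan with early break by a one-line forward collect-and-reduce: max over the indices of positive entries with default -1.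
import Mathlib
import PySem

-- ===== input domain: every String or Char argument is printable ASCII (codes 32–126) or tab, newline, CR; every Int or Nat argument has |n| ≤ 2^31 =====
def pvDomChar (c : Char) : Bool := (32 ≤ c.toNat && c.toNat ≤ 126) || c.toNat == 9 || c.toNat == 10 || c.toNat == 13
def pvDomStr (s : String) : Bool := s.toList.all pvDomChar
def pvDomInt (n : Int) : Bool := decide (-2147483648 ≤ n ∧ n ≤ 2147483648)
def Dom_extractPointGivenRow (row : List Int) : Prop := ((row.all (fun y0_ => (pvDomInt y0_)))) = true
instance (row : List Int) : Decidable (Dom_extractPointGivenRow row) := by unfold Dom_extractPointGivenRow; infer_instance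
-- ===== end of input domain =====

-- B replaces A's backwards scan-with-break by a forward "collect positive indices, reduce with max, default -1" (simpler one-liner).


-- ===== PORT A =====
-- the 'for i in range(len(row)): if row[counter-1-i] > 0: solution = …; break' loop;
-- the index counter-1-i is always in range, so pyGetD's default 0 is never used (exact).
def pvLoopA (row : List Int) (counter : Int) : List Int → Int
  | [] => -1
  | i :: rest =>
    if PySem.List.pyGetD row (counter - 1 - i) 0 > 0 then counter - 1 - i
    else pvLoopA row counter rest

def extractPointGivenRow (row : List Int) : Int :=
  pvLoopA row (row.length : Int) (PySem.List.pyRange 0 (row.length : Int) 1)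

-- ===== PORT B =====
-- max((i for i, v in enumerate(row) if v > 0), default=-1)
def extractPointGivenRow_alt (row : List Int) : Int :=
  (((PySem.List.enumerate row).filter (fun p => p.2 > 0)).map Prod.fst).foldl max (-1)

-- ===== PRECONDITION & SPEC =====
def Spec_extractPointGivenRow (row : List Int) (out : Int) : Prop := out = extractPointGivenRow_alt row
instance (row : List Int) (out : Int) : Decidable (Spec_extractPointGivenRow row out) := by unfold Spec_extractPointGivenRow; infer_instance

-- ===== CLAIM (what is proved, stated in full; the proofs are below) =====
def Claim_equal_extractPointGivenRow : Prop := ∀ (row : List Int), Dom_extractPointGivenRow row → Spec_extractPointGivenRow row (extractPointGivenRow row)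

-- ===== LEMMAS AND PROOFS =====

theorem pv_foldl_max_lt {l : List Int} {init n : Int} (h : ∀ y ∈ l, y < n) (h0 : init < n) :
    l.foldl max init < n := by
  induction l generalizing init with
  | nil => simpa using h0
  | cons a l ih =>
    simp only [List.foldl_cons]
    exact ih (fun y hy => h y (List.mem_cons_of_mem _ hy)) (max_lt h0 (h a List.mem_cons_self))

theorem pv_alt_snoc (row : List Int) (x : Int) :
    extractPointGivenRow_alt (row ++ [x]) =
      if x > 0 then (row.length : Int) else extractPointGivenRow_alt row := by
  unfold extractPointGivenRow_alt
  rw [show PySem.List.enumerate (row ++ [x]) = PySem.List.enumerate (row ++ [x]) 0 from rfl,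
    PySem.List.enumerate_append, PySem.List.enumerate_cons, PySem.List.enumerate_nil]
  simp only [List.filter_append, List.map_append, List.foldl_append, List.filter_cons,
    List.filter_nil, zero_add]
  by_cases hx : x > 0
  · rw [if_pos hx]
    rw [if_pos (by simp [hx])]
    simp only [List.map_cons, List.map_nil, List.foldl_cons, List.foldl_nil]
    have hlt : (((PySem.List.enumerate row 0).filter (fun p => p.2 > 0)).map Prod.fst).foldl max (-1) <
        (row.length : Int) := by
      apply pv_foldl_max_lt _ (by omega)
      intro y hy
      simp only [List.mem_map, List.mem_filter] at hy
      obtain ⟨p, ⟨hp, _⟩, rfl⟩ := hy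
      rw [PySem.List.mem_enumerate_iff] at hp
      obtain ⟨k, hk, rfl⟩ := hp
      simpa using by exact_mod_cast hk
    exact max_eq_right hlt.le
  · rw [if_neg hx]
    rw [if_neg (by simp [hx])]
    rfl

theorem pv_loopA_shift (row : List Int) (x : Int) :
    ∀ (l : List Int), (∀ i ∈ l, 0 ≤ i ∧ i < (row.length : Int)) →
      pvLoopA (row ++ [x]) ((row.length : Int) + 1) (l.map (fun i => i + 1)) =
      pvLoopA row (row.length : Int) l := by
  intro l
  induction l with
  | nil => intro _; rfl
  | cons i l ih =>
    intro h
    obtain ⟨hi0, hi1⟩ := h i List.mem_cons_self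
    rw [List.map_cons]
    show (if PySem.List.pyGetD (row ++ [x]) ((row.length : Int) + 1 - 1 - (i + 1)) 0 > 0
          then (row.length : Int) + 1 - 1 - (i + 1)
          else pvLoopA (row ++ [x]) ((row.length : Int) + 1) (l.map (fun i => i + 1))) = _
    have hidx : (row.length : Int) + 1 - 1 - (i + 1) = (row.length : Int) - 1 - i := by ring
    have hj0 : (0:Int) ≤ (row.length : Int) - 1 - i := by omega
    have hj1 : (row.length : Int) - 1 - i < (row.length : Int) := by omega
    have hget : PySem.List.pyGetD (row ++ [x]) ((row.length : Int) - 1 - i) 0 =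
        PySem.List.pyGetD row ((row.length : Int) - 1 - i) 0 := by
      rw [PySem.List.pyGetD_eq_getElem (row ++ [x]) 0 hj0 (by simp; omega),
          PySem.List.pyGetD_eq_getElem row 0 hj0 (by exact_mod_cast hj1)]
      exact List.getElem_append_left (by omega)
    rw [hidx, hget]
    show _ = (if PySem.List.pyGetD row ((row.length : Int) - 1 - i) 0 > 0
          then (row.length : Int) - 1 - i
          else pvLoopA row (row.length : Int) l)
    split
    · rfl
    · exact ih (fun j hj => h j (List.mem_cons_of_mem _ hj))

theorem pv_A_snoc (row : List Int) (x : Int) :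
    extractPointGivenRow (row ++ [x]) =
      if x > 0 then (row.length : Int) else extractPointGivenRow row := by
  unfold extractPointGivenRow
  have hlen : ((row ++ [x]).length : Int) = (row.length : Int) + 1 := by simp
  rw [hlen]
  rw [PySem.List.pyRange_one_cons (by omega)]
  show (if PySem.List.pyGetD (row ++ [x]) ((row.length : Int) + 1 - 1 - 0) 0 > 0
        then (row.length : Int) + 1 - 1 - 0
        else pvLoopA (row ++ [x]) ((row.length : Int) + 1)
          (PySem.List.pyRange (0 + 1) ((row.length : Int) + 1) 1)) = _
  have hidx0 : (row.length : Int) + 1 - 1 - 0 = (row.length : Int) := by ring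
  have hget : PySem.List.pyGetD (row ++ [x]) ((row.length : Int) + 1 - 1 - 0) 0 = x := by
    rw [hidx0, PySem.List.pyGetD_eq_getElem (row ++ [x]) 0 (by omega) (by simp)]
    simp
  rw [hget]
  by_cases hx : x > 0
  · rw [if_pos hx, if_pos hx, hidx0]
  · rw [if_neg hx, if_neg hx]
    have h1 : PySem.List.pyRange (0+1) ((row.length : Int) + 1) 1 =
        (PySem.List.pyRange 0 (row.length : Int) 1).map (fun i => i + 1) := by
      rw [PySem.List.pyRange_one, PySem.List.pyRange_one,
        show ((row.length : Int) + 1 - (0+1)).toNat = ((row.length : Int) - 0).toNat by omega,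
        List.map_map]
      exact List.map_congr_left (fun k _ => by simp [Function.comp]; ring)
    rw [h1]
    exact pv_loopA_shift row x (PySem.List.pyRange 0 (row.length : Int) 1)
      (fun i hi => by rw [PySem.List.mem_pyRange_one] at hi; exact hi)

theorem pv_eq (row : List Int) : extractPointGivenRow row = extractPointGivenRow_alt row := by
  induction row using List.reverseRecOn with
  | nil => rfl
  | append_singleton row x ih =>
    rw [pv_A_snoc, pv_alt_snoc]
    split
    · rfl
    · exact ih

-- ===== VERDICT (by name: the statement is the Claim_ definition above) =====
theorem extractPointGivenRow_spec : Claim_equal_extractPointGivenRow := by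
  intro row _
  exact pv_eq row
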